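-- pv_equiv track=rewrite | github.com/Klaraaorban/University | Programmierung_Grundlagen/Lab1/u2b.py | teilfolge
-- ===== SOURCE A (Python) =====
-- def rel_prim(num):
--     l = []
--     if num == 1:
--         return [1]
--     else:
--         for oszt in range(2, num + 1):
--             if num % oszt == 0:
--                 l.append(oszt)
--     return l
--
-- def teilfolge(liste):
--     l = []
--     max_l = []
--     longest = liste[0]
--     for i in liste[1:]:
--         con = True
--         longest_last = rel_prim(longest)
--         longest_now = rel_prim(i)
--         if l == []:
--             l.append(longest)
--         for j in longest_last:
--             if j in longest_now:
--                 con = False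
--         if con == True:
--             l.append(i)
--         else:
--             l = []
--         if len(l) > len(max_l):
--             max_l = l
--         longest = i
--     return max_l
-- ===== SOURCE B (Python) =====
-- def rel_prim(num):
--     if num == 1:
--         return [1]
--     return [d for d in range(2, num + 1) if num % d == 0]
--
--
-- def teilfolge(liste):
--     def coprime(a, b):
--         return set(rel_prim(a)).isdisjoint(rel_prim(b))
--
--     edges = [coprime(a, b) for a, b in zip(liste, liste[1:])]
--     best_start, best_len, cur_start = 0, 0, 0
--     for k, e in enumerate(edges):
--         if e:
--             if k - cur_start + 2 > best_len:
--                 best_start, best_len = cur_start, k - cur_start + 2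
--         else:
--             cur_start = k + 1
--     return liste[best_start:best_start + best_len]
-- ===== Notes on version B (the rewrite author's own statement) =====
-- stated objective: alternative
-- what changed: B replaces A's run-list building (divisor lists intersected by a nested membership loop, run lists l/max_l mutated with Python aliasing) by a precomputed boolean edge table (set-disjointness of the module's rel_prim divisor lists), an index-arithmetic scan for the earliest longest block of true edges, and one final slice; Pre_ excludes only the empty list, on which A raises IndexError indexing its first element.
import Mathlib
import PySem

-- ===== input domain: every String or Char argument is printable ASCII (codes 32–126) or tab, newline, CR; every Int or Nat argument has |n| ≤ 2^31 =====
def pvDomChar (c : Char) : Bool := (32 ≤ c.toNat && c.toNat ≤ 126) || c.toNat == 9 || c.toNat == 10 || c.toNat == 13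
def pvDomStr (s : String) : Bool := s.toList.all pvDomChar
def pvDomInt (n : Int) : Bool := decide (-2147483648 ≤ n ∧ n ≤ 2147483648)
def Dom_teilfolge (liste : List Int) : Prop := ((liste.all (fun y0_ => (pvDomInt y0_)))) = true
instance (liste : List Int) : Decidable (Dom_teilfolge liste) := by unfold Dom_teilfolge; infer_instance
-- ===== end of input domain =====

-- B replaces A's run-list building by a boolean edge table (set-disjointness of rel_prim
-- divisor lists) plus an index scan and one final slice; alternative decomposition, not timed faster.

-- ===== PORT A =====
def relPrim (num : Int) : List Int :=
  if num = 1 then [1]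
  else (PySem.List.pyRange 2 (num + 1) 1).foldl
    (fun l oszt => if PySem.Int.mod num oszt = 0 then l ++ [oszt] else l) []

def teilfolge (liste : List Int) : List Int :=
  match liste with
  | [] => []  -- Python raises IndexError on the first-element access; excluded by Pre_teilfolge
  | x :: rest =>
    (rest.foldl (fun (st : List Int × List Int × Int) i =>
        let l := st.1
        let maxl := st.2.1
        let longest := st.2.2
        let longestLast := relPrim longest
        let longestNow := relPrim i
        let l := if l = [] then l ++ [longest] else l
        let con := longestLast.foldl (fun c j => if longestNow.contains j then false else c) true
        let l := if con then l ++ [i] else ([] : List Int)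
        let maxl := if l.length > maxl.length then l else maxl
        (l, maxl, i)) ([], [], x)).2.1

-- ===== PORT B =====
def relPrimB (num : Int) : List Int :=
  if num = 1 then [1]
  else (PySem.List.pyRange 2 (num + 1) 1).filter (fun d => decide (PySem.Int.mod num d = 0))

def coprimeB (a b : Int) : Bool :=
  PySem.Set.isdisjoint (PySem.Set.ofList (relPrimB a)) (relPrimB b)

def teilfolge_alt (liste : List Int) : List Int :=
  let edges := List.zipWith coprimeB liste liste.tail
  let st := (PySem.List.enumerate edges 0).foldl
    (fun (st : Int × Int × Int) (ke : Int × Bool) =>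
      if ke.2 then
        (if ke.1 - st.2.2 + 2 > st.2.1 then (st.2.2, ke.1 - st.2.2 + 2, st.2.2) else st)
      else (st.1, st.2.1, ke.1 + 1)) ((0, 0, 0) : Int × Int × Int)
  PySem.List.slice liste (some st.1) (some (st.1 + st.2.1))

-- ===== PRECONDITION & SPEC =====
-- Pre_ excludes only the empty list, on which Python A raises IndexError indexing its first element.
def Pre_teilfolge (liste : List Int) : Prop := liste ≠ []
instance (liste : List Int) : Decidable (Pre_teilfolge liste) := by unfold Pre_teilfolge; infer_instance
def pvWitness_teilfolge : List Int := [2, 3]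

def Spec_teilfolge (liste : List Int) (out : List Int) : Prop := out = teilfolge_alt liste
instance (liste : List Int) (out : List Int) : Decidable (Spec_teilfolge liste out) := by unfold Spec_teilfolge; infer_instance

-- ===== CLAIM (what is proved, stated in full; the proofs are below) =====
def Claim_equal_teilfolge : Prop := ∀ (liste : List Int), Dom_teilfolge liste → Pre_teilfolge liste → Spec_teilfolge liste (teilfolge liste)

-- ===== LEMMAS AND PROOFS =====

-- the loop bodies of the two ports, named for the proofs (definitionally the ports' lambdas)
def stepA (st : List Int × List Int × Int) (i : Int) : List Int × List Int × Int :=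
  let l := st.1
  let maxl := st.2.1
  let longest := st.2.2
  let longestLast := relPrim longest
  let longestNow := relPrim i
  let l := if l = [] then l ++ [longest] else l
  let con := longestLast.foldl (fun c j => if longestNow.contains j then false else c) true
  let l := if con then l ++ [i] else ([] : List Int)
  let maxl := if l.length > maxl.length then l else maxl
  (l, maxl, i)

def stepB (st : Int × Int × Int) (ke : Int × Bool) : Int × Int × Int :=
  if ke.2 then
    (if ke.1 - st.2.2 + 2 > st.2.1 then (st.2.2, ke.1 - st.2.2 + 2, st.2.2) else st)
  else (st.1, st.2.1, ke.1 + 1)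

def edgesOf (L : List Int) : List Bool := List.zipWith coprimeB L L.tail

def dslice (L : List Int) (a b : Nat) : List Int := (L.drop a).take (b - a)

lemma foldl_flag (P : Int → Bool) (L : List Int) (c : Bool) :
    L.foldl (fun c j => if P j then false else c) c = (c && L.all (fun j => !P j)) := by
  induction L generalizing c with
  | nil => simp
  | cons j L ih =>
    rw [List.foldl_cons, ih, List.all_cons]
    cases P j
    · simp
    · simp

lemma relPrim_eq_relPrimB (num : Int) : relPrim num = relPrimB num := by
  unfold relPrim relPrimB
  by_cases h : num = 1
  · simp [h]
  · rw [if_neg h, if_neg h]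
    exact PySem.List.foldl_append_ite_eq_filter (fun x => PySem.Int.mod num x = 0)
      (PySem.List.pyRange 2 (num + 1)) []

lemma coprime_eq (a b : Int) :
    ((relPrim a).foldl (fun c j => if (relPrim b).contains j then false else c) true) = coprimeB a b := by
  rw [foldl_flag (fun j => (relPrim b).contains j), Bool.true_and, Bool.eq_iff_iff]
  unfold coprimeB
  rw [PySem.Set.isdisjoint_iff]
  simp [relPrim_eq_relPrimB, PySem.Set.mem_ofList]

lemma dslice_length (L : List Int) (a b : Nat) (hb : b ≤ L.length) :
    (dslice L a b).length = b - a := by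
  simp [dslice]
  omega

lemma dslice_ne_nil (L : List Int) (a b : Nat) (h : a < b) (ha : a < L.length) :
    dslice L a b ≠ [] := by
  apply List.ne_nil_of_length_pos
  simp [dslice]
  omega

lemma dslice_self (L : List Int) (a : Nat) : dslice L a a = [] := by
  simp [dslice]

lemma dslice_append (L : List Int) (a p : Nat) (hap : a ≤ p) (hp : p < L.length) :
    dslice L a p ++ [L[p]] = dslice L a (p + 1) := by
  unfold dslice
  rw [show p + 1 - a = (p - a) + 1 by omega, List.take_add_one, List.getElem?_drop,
    show a + (p - a) = p by omega, List.getElem?_eq_getElem hp]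
  rfl

lemma loop_eq (L : List Int) (fuel p cs bs bl : Nat)
    (hfuel : L.length = p + 1 + fuel)
    (hcs : cs ≤ p) (hml : bs + bl ≤ p + 1) :
    ((L.drop (p + 1)).foldl stepA
        ((if cs = p then [] else dslice L cs (p + 1)), dslice L bs (bs + bl),
          L.getD p 0)).2.1
    = (let st := (PySem.List.enumerate ((edgesOf L).drop p) (p : Int)).foldl stepB
          ((bs : Int), (bl : Int), (cs : Int))
       PySem.List.slice L (some st.1) (some (st.1 + st.2.1))) := by
  induction fuel generalizing p cs bs bl with
  | zero =>
    have hlen : L.length = p + 1 := by omega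
    have hd : L.drop (p + 1) = [] := List.drop_eq_nil_of_le (by omega)
    have he : (edgesOf L).drop p = [] := by
      apply List.drop_eq_nil_of_le
      simp [edgesOf, List.length_zipWith]
      omega
    rw [hd, he]
    simp only [List.foldl_nil, PySem.List.enumerate_nil]
    rw [show (bs : Int) + (bl : Int) = ((bs + bl : Nat) : Int) by push_cast; ring,
      PySem.List.slice_natCast]
    simp [dslice]
  | succ fuel ih =>
    have hp1 : p + 1 < L.length := by omega
    have hel : (edgesOf L).length = L.length - 1 := by
      simp [edgesOf, List.length_zipWith]
    have hdrop : L.drop (p + 1) = L[p + 1] :: L.drop (p + 2) := List.drop_eq_getElem_cons hp1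
    have hedrop : (edgesOf L).drop p = coprimeB L[p] L[p + 1] :: (edgesOf L).drop (p + 1) := by
      rw [List.drop_eq_getElem_cons (by omega)]
      congr 1
      rw [show (edgesOf L)[p]'(by omega) = coprimeB L[p] (L.tail[p]'(by simp [List.length_tail]; omega)) from List.getElem_zipWith ..]
      congr 1
      exact List.getElem_tail _
    rw [hdrop, hedrop, List.foldl_cons, PySem.List.enumerate_cons, List.foldl_cons]
    have hgetD : L.getD p 0 = L[p]'(by omega) := List.getD_eq_getElem L 0 (by omega)
    have hgetD1 : L.getD (p + 1) 0 = L[p + 1]'(by omega) := List.getD_eq_getElem L 0 (by omega)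
    have hl1 : (if (if cs = p then ([] : List Int) else dslice L cs (p + 1)) = [] then
        (if cs = p then ([] : List Int) else dslice L cs (p + 1)) ++ [L[p]'(by omega)]
        else (if cs = p then ([] : List Int) else dslice L cs (p + 1))) = dslice L cs (p + 1) := by
      by_cases hcsp : cs = p
      · subst hcsp
        rw [if_pos rfl, if_pos rfl, List.nil_append,
          ← dslice_append L cs cs (le_refl cs) (by omega), dslice_self, List.nil_append]
      · rw [if_neg hcsp, if_neg (dslice_ne_nil L cs (p + 1) (by omega) (by omega))]
    have hcast1 : ((p + 1 : Nat) : Int) = (p : Int) + 1 := by push_cast; ring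
    simp only [stepA, stepB, hgetD, coprime_eq, hl1]
    cases he : coprimeB (L[p]'(by omega)) (L[p + 1]'(by omega)) with
    | true =>
      simp only [if_true]
      rw [dslice_append L cs (p + 1) (by omega) hp1]
      have hlen2 : (dslice L cs (p + 2)).length = p + 2 - cs :=
        dslice_length L cs (p + 2) (by omega)
      have hlenm : (dslice L bs (bs + bl)).length = bl := by
        rw [dslice_length L bs (bs + bl) (by omega)]
        omega
      rw [hlen2, hlenm]
      by_cases hgt : bl < p + 2 - cs
      · rw [if_pos (by omega), if_pos (by omega : (p : Int) - (cs : Int) + 2 > (bl : Int))]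
        have hcast2 : ((p + 2 - cs : Nat) : Int) = (p : Int) - (cs : Int) + 2 := by omega
        have := ih (p + 1) cs cs (p + 2 - cs) (by omega) (by omega) (by omega)
        rw [if_neg (by omega), hgetD1, hcast2, hcast1] at this
        rw [show cs + (p + 2 - cs) = p + 2 by omega] at this
        exact this
      · rw [if_neg (by omega), if_neg (by omega : ¬((p : Int) - (cs : Int) + 2 > (bl : Int)))]
        have := ih (p + 1) cs bs bl (by omega) (by omega) (by omega)
        rw [if_neg (by omega), hgetD1, hcast1] at this
        exact this
    | false =>
      simp only [Bool.false_eq_true, reduceIte, List.length_nil]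
      rw [if_neg (by omega)]
      have := ih (p + 1) (p + 1) bs bl (by omega) (by omega) (by omega)
      rw [if_pos rfl, hgetD1, hcast1] at this
      exact this

-- ===== VERDICT (by name: the statement is the Claim_ definition above) =====
theorem teilfolge_spec : Claim_equal_teilfolge := by
  intro liste _ hpre
  unfold Spec_teilfolge
  obtain ⟨x, rest, rfl⟩ := List.exists_cons_of_ne_nil hpre
  show (rest.foldl stepA ([], [], x)).2.1 = teilfolge_alt (x :: rest)
  have h := loop_eq (x :: rest) rest.length 0 0 0 0 (by rw [List.length_cons]; omega) (le_refl 0) (by omega)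
  rw [if_pos rfl] at h
  rw [show dslice (x :: rest) 0 0 = [] from rfl] at h
  simp only [Nat.cast_zero, List.drop_zero, List.drop_succ_cons, List.getD_cons_zero] at h
  exact h
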